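-- pv_equiv track=rewrite | github.com/hexingzhou/ProjectCompare | butils.py | get_lastest_name_from_svn_log
-- ===== SOURCE A (Python) =====
-- def get_lastest_name_from_svn_log(log_string):
--     name = None
--     lines = log_string.split('\n')
--     lines.reverse()
--     for line in lines:
--         if '|' in line:
--             parts = line.split('|')
--             name = parts[1].strip()
--
--     return name
-- ===== SOURCE B (Python) =====
-- def get_lastest_name_from_svn_log(log_string):
--     for line in log_string.split('\n'):
--         if '|' in line:
--             return line.split('|')[1].strip()
--     return None
-- ===== Notes on version B (the rewrite author's own statement) =====
-- stated objective: simpler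
-- what changed: B scans the lines forward and returns immediately at the first line containing a pipe character, dropping A's list reversal and overwriting accumulator (whose last overwrite is that same first line).
import Mathlib
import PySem

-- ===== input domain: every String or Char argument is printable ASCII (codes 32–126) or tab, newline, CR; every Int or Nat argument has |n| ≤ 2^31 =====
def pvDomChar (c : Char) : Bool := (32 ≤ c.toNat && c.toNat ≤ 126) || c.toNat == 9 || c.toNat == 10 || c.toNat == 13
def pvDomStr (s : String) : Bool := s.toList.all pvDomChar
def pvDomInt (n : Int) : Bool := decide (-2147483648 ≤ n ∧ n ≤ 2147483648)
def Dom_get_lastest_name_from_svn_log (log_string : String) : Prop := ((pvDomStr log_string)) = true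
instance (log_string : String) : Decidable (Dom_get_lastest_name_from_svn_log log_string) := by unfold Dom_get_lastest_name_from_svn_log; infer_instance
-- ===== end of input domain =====

-- B scans the split lines forward and returns at the first line containing the pipe separator;
-- A reverses the list and overwrites an accumulator (its last overwrite is that same first line).

-- ===== PORT A =====
-- split? is none only for an empty separator; both separators here are nonempty literals, so
-- .getD [] never fires. pyGetD is exact for the parts-index-1 access: when the separator occurs
-- in the line, the split has at least two parts, so the default is never used (Python never
-- raises here).
def get_lastest_name_from_svn_log (log_string : String) : Option String :=
  let lines := (PySem.Str.split? log_string "\n").getD []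
  let lines := lines.reverse
  lines.foldl
    (fun name line =>
      if PySem.Str.isIn "|" line then
        let parts := (PySem.Str.split? line "|").getD []
        some (PySem.Str.strip (PySem.List.pyGetD parts 1 ""))
      else name)
    none

-- ===== PORT B =====
-- early-return loop: the first matching line wins
def pvAltGo : List String → Option String
  | [] => none
  | line :: rest =>
    if PySem.Str.isIn "|" line then
      some (PySem.Str.strip (PySem.List.pyGetD ((PySem.Str.split? line "|").getD []) 1 ""))
    else pvAltGo rest

def get_lastest_name_from_svn_log_alt (log_string : String) : Option String :=
  pvAltGo ((PySem.Str.split? log_string "\n").getD [])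

-- ===== PRECONDITION & SPEC =====
def Spec_get_lastest_name_from_svn_log (log_string : String) (out : Option String) : Prop := out = get_lastest_name_from_svn_log_alt log_string
instance (log_string : String) (out : Option String) : Decidable (Spec_get_lastest_name_from_svn_log log_string out) := by unfold Spec_get_lastest_name_from_svn_log; infer_instance

-- ===== CLAIM (what is proved, stated in full; the proofs are below) =====
def Claim_equal_get_lastest_name_from_svn_log : Prop := ∀ (log_string : String), Dom_get_lastest_name_from_svn_log log_string → Spec_get_lastest_name_from_svn_log log_string (get_lastest_name_from_svn_log log_string)

-- ===== LEMMAS AND PROOFS =====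

-- folding A's overwriting step over the REVERSED lines returns the first forward match (else the
-- initial accumulator)
theorem pv_foldl_reverse_eq_altGo (lines : List String) (acc : Option String) :
    lines.reverse.foldl
      (fun name line =>
        if PySem.Str.isIn "|" line then
          some (PySem.Str.strip (PySem.List.pyGetD ((PySem.Str.split? line "|").getD []) 1 ""))
        else name)
      acc = (pvAltGo lines).or acc := by
  induction lines generalizing acc with
  | nil => rfl
  | cons l rest ih =>
    simp only [List.reverse_cons, List.foldl_append, List.foldl_cons, List.foldl_nil, ih, pvAltGo]
    by_cases h : PySem.Str.isIn "|" l = true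
    · rw [if_pos h, if_pos h, Option.some_or]
    · rw [if_neg h, if_neg h]

-- ===== VERDICT (by name: the statement is the Claim_ definition above) =====
theorem get_lastest_name_from_svn_log_spec : Claim_equal_get_lastest_name_from_svn_log := by
  intro s _
  show _ = _
  unfold get_lastest_name_from_svn_log get_lastest_name_from_svn_log_alt
  simp only [pv_foldl_reverse_eq_altGo, Option.or_none]
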